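-- pv_equiv track=rewrite | github.com/winterdrive/myLeetHub | 2221-find-triangular-sum-of-an-array/2221-find-triangular-sum-of-an-array.py | addMyList
-- ===== SOURCE A (Python) =====
-- def addMyList(myList):
--         newList=list()
--         if(len(myList)==1):
--             return myList
--         for i in range(len(myList)):
--             if(i==len(myList)-1):
--                 continue
--             else:
--                 newList.append(myList[i]+myList[i+1])
--         if len(newList)>1:
--             return addMyList(newList)
--         else:
--             return newList
-- ===== SOURCE B (Python) =====
-- def addMyList(myList):
--     # Closed form: the triangular sum of a is sum of C(n-1,k)*a[k]; binomials built incrementally.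
--     if not myList:
--         return []
--     n = len(myList)
--     s = 0
--     c = 1
--     for k, x in enumerate(myList):
--         s += c * x
--         c = c * (n - 1 - k) // (k + 1)
--     return [s]
-- ===== Notes on version B (the rewrite author's own statement) =====
-- stated objective: faster
-- what changed: Replaces the O(n^2) repeated adjacent-pair reduction with the closed form sum C(n-1,k)*a[k], computing the binomial coefficients incrementally in one pass.
import Mathlib
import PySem

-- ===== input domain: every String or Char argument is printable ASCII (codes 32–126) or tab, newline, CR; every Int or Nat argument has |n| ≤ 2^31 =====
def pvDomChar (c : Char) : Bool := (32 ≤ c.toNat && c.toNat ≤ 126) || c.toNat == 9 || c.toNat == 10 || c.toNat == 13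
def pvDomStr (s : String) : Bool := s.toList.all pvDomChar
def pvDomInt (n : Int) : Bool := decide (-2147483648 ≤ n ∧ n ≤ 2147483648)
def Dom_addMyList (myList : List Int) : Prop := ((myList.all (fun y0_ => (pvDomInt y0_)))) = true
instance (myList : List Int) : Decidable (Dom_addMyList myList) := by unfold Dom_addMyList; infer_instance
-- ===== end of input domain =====

-- B replaces A's repeated adjacent-sum reduction by the one-pass closed form Σ C(n-1,k)·a[k] (objective: faster).

-- ===== PORT A =====
-- A's for-loop building newList (adjacent sums, skipping the last index)
def pvNewList (myList : List Int) : List Int :=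
  (PySem.List.pyRange 0 myList.length 1).foldl
    (fun acc i =>
      if i = (myList.length : Int) - 1 then acc
      else acc ++ [PySem.List.pyGetD myList i 0 + PySem.List.pyGetD myList (i + 1) 0]) []

-- characterisation of the loop; needed above the port for its termination proof
theorem pvNewList_eq (l : List Int) : pvNewList l = l.zipWith (· + ·) l.tail := by
  unfold pvNewList
  cases l with
  | nil => decide
  | cons x tl =>
    rw [PySem.List.pyRange_one_append 0 (((x::tl).length:Int)-1) ((x::tl).length) (by simp) (by omega)]
    rw [List.foldl_append]
    have hsing : PySem.List.pyRange (((x::tl).length:Int)-1) ((x::tl).length:Int) = [((x::tl).length:Int)-1] := by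
      rw [PySem.List.pyRange_one_cons (by omega), PySem.List.pyRange_one_eq_nil (by omega)]
    rw [hsing]
    simp only [List.foldl_cons, List.foldl_nil]
    rw [if_pos trivial]
    rw [PySem.List.foldl_congr_mem _ _
      (fun acc i => acc ++ [PySem.List.pyGetD (x::tl) i 0 + PySem.List.pyGetD (x::tl) (i+1) 0]) []
      (by
        intro acc i hi
        rw [PySem.List.mem_pyRange_one] at hi
        rw [if_neg (by omega)])]
    rw [PySem.List.foldl_append_singleton_eq_map]
    apply List.ext_getElem
    · simp [PySem.List.length_pyRange_one]
    · intro k h1 h2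
      simp only [List.nil_append, List.getElem_map, PySem.List.getElem_pyRange_one,
        List.getElem_zipWith, zero_add]
      have hk : k < tl.length := by
        simpa [PySem.List.length_pyRange_one] using h1
      have e1 : PySem.List.pyGetD (x::tl) ((k:Int)) 0 = (x::tl)[k]'(by simp; omega) := by
        rw [PySem.List.pyGetD_natCast]
        exact List.getD_eq_getElem _ _ (by simp; omega)
      have e2 : PySem.List.pyGetD (x::tl) ((k:Int)+1) 0 = (x::tl)[k+1]'(by simp; omega) := by
        have : ((k:Int)+1) = ((k+1:Nat):Int) := by push_cast; ring
        rw [this, PySem.List.pyGetD_natCast]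
        exact List.getD_eq_getElem _ _ (by simp; omega)
      rw [e1, e2]
      simp

theorem pvNewList_length (l : List Int) : (pvNewList l).length = l.length - 1 := by
  rw [pvNewList_eq]
  cases l with
  | nil => simp
  | cons x tl => simp

def addMyList (myList : List Int) : List Int :=
  if myList.length = 1 then myList
  else
    if 1 < (pvNewList myList).length then addMyList (pvNewList myList)
    else pvNewList myList
termination_by myList.length
decreasing_by
  simp only [pvNewList_length] at *
  omega

-- ===== PORT B =====
def addMyList_alt (myList : List Int) : List Int :=
  if myList = [] then []
  else
    let n : Int := myList.length
    let sc := (PySem.List.enumerate myList 0).foldl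
      (fun (sc : Int × Int) (kx : Int × Int) =>
        (sc.1 + sc.2 * kx.2, PySem.Int.floordiv (sc.2 * (n - 1 - kx.1)) (kx.1 + 1)))
      (0, 1)
    [sc.1]

-- ===== PRECONDITION & SPEC =====
def Spec_addMyList (myList : List Int) (out : List Int) : Prop := out = addMyList_alt myList
instance (myList : List Int) (out : List Int) : Decidable (Spec_addMyList myList out) := by unfold Spec_addMyList; infer_instance

-- ===== CLAIM (what is proved, stated in full; the proofs are below) =====
def Claim_equal_addMyList : Prop := ∀ (myList : List Int), Dom_addMyList myList → Spec_addMyList myList (addMyList myList)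

-- ===== LEMMAS AND PROOFS =====

-- the triangular value: Σ_{k<n} C(n-1,k) · a[k]
def pvT (l : List Int) : Int :=
  ∑ k ∈ Finset.range l.length, (((l.length - 1).choose k : Nat) : Int) * l.getD k 0

-- Pascal step: one adjacent-sum pass preserves the binomial-weighted sum
theorem pvKey (a : ℕ → ℤ) (m : ℕ) :
    ∑ k ∈ Finset.range (m+1), ((m.choose k : ℕ) : ℤ) * (a k + a (k+1))
      = ∑ k ∈ Finset.range (m+2), (((m+1).choose k : ℕ) : ℤ) * a k := by
  have h1 : ∑ k ∈ Finset.range (m+1), ((m.choose k : ℕ):ℤ) * (a k + a (k+1))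
      = (∑ k ∈ Finset.range (m+1), ((m.choose k:ℕ):ℤ) * a k)
        + ∑ k ∈ Finset.range (m+1), ((m.choose k:ℕ):ℤ) * a (k+1) := by
    rw [← Finset.sum_add_distrib]; apply Finset.sum_congr rfl; intros; ring
  rw [h1]
  rw [Finset.sum_range_succ' (fun k => ((m.choose k:ℕ):ℤ) * a k) m]
  rw [Finset.sum_range_succ' (fun k => (((m+1).choose k:ℕ):ℤ) * a k) (m+1)]
  simp only [Nat.choose_zero_right, Nat.cast_one, one_mul]
  have h2 : ∑ k ∈ Finset.range m, ((m.choose (k+1):ℕ):ℤ) * a (k+1)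
      = ∑ k ∈ Finset.range (m+1), ((m.choose (k+1):ℕ):ℤ) * a (k+1) := by
    rw [Finset.sum_range_succ]; simp [Nat.choose_succ_self]
  rw [h2]
  have h3 : (∑ k ∈ Finset.range (m+1), ((m.choose (k+1):ℕ):ℤ) * a (k+1))
      + ∑ k ∈ Finset.range (m+1), ((m.choose k:ℕ):ℤ) * a (k+1)
      = ∑ k ∈ Finset.range (m+1), (((m+1).choose (k+1):ℕ):ℤ) * a (k+1) := by
    rw [← Finset.sum_add_distrib]; apply Finset.sum_congr rfl
    intro k _
    have hp := Nat.choose_succ_succ' m k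
    push_cast [hp]; ring
  linarith [h3]

theorem pvT_adj (l : List Int) (h : 2 ≤ l.length) :
    pvT (l.zipWith (· + ·) l.tail) = pvT l := by
  obtain ⟨m, hm⟩ : ∃ m, l.length = m + 2 := ⟨l.length - 2, by omega⟩
  have hlen : (l.zipWith (· + ·) l.tail).length = m + 1 := by
    simp [List.length_zipWith, hm]
  unfold pvT
  rw [hlen, hm]
  simp only [Nat.add_sub_cancel]
  have hget : ∀ k ∈ Finset.range (m+1),
      ((m.choose k:ℕ):ℤ) * (l.zipWith (· + ·) l.tail).getD k 0
        = ((m.choose k:ℕ):ℤ) * (l.getD k 0 + l.getD (k+1) 0) := by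
    intro k hk
    have hk' : k < m + 1 := Finset.mem_range.mp hk
    congr 1
    rw [List.getD_eq_getElem _ _ (by omega)]
    rw [List.getElem_zipWith]
    rw [List.getD_eq_getElem _ _ (by omega), List.getD_eq_getElem _ _ (by omega)]
    simp
  rw [Finset.sum_congr rfl hget]
  exact pvKey (fun k => l.getD k 0) m

-- A computes the triangular value (strong induction on the length)
theorem addMyList_eq_T' : ∀ (n : ℕ) (l : List Int), l.length = n → l ≠ [] → addMyList l = [pvT l] := by
  intro n
  induction n using Nat.strong_induction_on with
  | _ n ih =>
    intro l hlen hne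
    rw [addMyList]
    by_cases h1 : l.length = 1
    · rw [if_pos h1]
      obtain ⟨y, hy⟩ := List.length_eq_one_iff.mp h1
      subst hy
      simp [pvT]
    · rw [if_neg h1]
      have h0 : 0 < l.length := List.length_pos_iff.mpr hne
      have h2 : 2 ≤ l.length := by omega
      have hlnl : (pvNewList l).length = l.length - 1 := pvNewList_length l
      by_cases h3 : 1 < (pvNewList l).length
      · rw [if_pos h3]
        rw [ih (pvNewList l).length (by omega) (pvNewList l) rfl
          (by intro hc; rw [hc] at h3; simp at h3)]
        rw [pvNewList_eq, pvT_adj l h2]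
      · rw [if_neg h3]
        have h4 : (pvNewList l).length = 1 := by omega
        obtain ⟨y, hy⟩ := List.length_eq_one_iff.mp h4
        have hT : pvT (pvNewList l) = pvT l := by
          rw [pvNewList_eq]; exact pvT_adj l h2
        rw [hy] at hT
        have hy' : pvT [y] = y := by simp [pvT]
        rw [hy, ← hT, hy']

-- invariant of B's fold: s accumulates the binomial-weighted prefix sum, c stays C(n-1, j)
theorem pvFold_inv (n : ℕ) :
    ∀ (tl : List Int) (j : ℕ) (s : ℤ), j + tl.length = n →
    ((PySem.List.enumerate tl (j:ℤ)).foldl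
      (fun (sc : Int × Int) (kx : Int × Int) =>
        (sc.1 + sc.2 * kx.2,
         PySem.Int.floordiv (sc.2 * ((n:ℤ) - 1 - kx.1)) (kx.1 + 1)))
      (s, (((n-1).choose j : ℕ) : ℤ))).1
      = s + ∑ i ∈ Finset.range tl.length, (((n-1).choose (j+i) : ℕ) : ℤ) * tl.getD i 0 := by
  intro tl
  induction tl with
  | nil => intro j s _; simp [PySem.List.enumerate]
  | cons x tl ihtl =>
    intro j s hj
    rw [PySem.List.enumerate_cons]
    rw [List.foldl_cons]
    have hcast : ((j:ℤ) + 1) = ((j+1 : ℕ) : ℤ) := by push_cast; ring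
    have hj' : j + tl.length + 1 = n := by simpa using hj
    have hc : PySem.Int.floordiv ((((n-1).choose j : ℕ):ℤ) * ((n:ℤ) - 1 - (j:ℤ))) (((j+1 : ℕ)):ℤ)
        = (((n-1).choose (j+1) : ℕ) : ℤ) := by
      have hjn : j + 1 ≤ n := by omega
      have h5 : ((n:ℤ) - 1 - (j:ℤ)) = ((n - 1 - j : ℕ) : ℤ) := by omega
      rw [h5]
      rw [show (((n-1).choose j : ℕ):ℤ) * ((n - 1 - j : ℕ) : ℤ)
          = (((n-1).choose j * (n - 1 - j) : ℕ) : ℤ) by push_cast; ring]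
      rw [show (n-1).choose j * (n - 1 - j) = (n-1).choose (j+1) * (j+1) from
        (Nat.choose_succ_right_eq (n-1) j).symm]
      rw [PySem.Int.floordiv_natCast]
      rw [Nat.mul_div_cancel _ (Nat.succ_pos j)]
    rw [hcast, hc]
    rw [ihtl (j+1) (s + (((n-1).choose j : ℕ):ℤ) * x) (by simp at hj ⊢; omega)]
    simp only [List.length_cons]
    rw [Finset.sum_range_succ' (fun i => (((n-1).choose (j+i) : ℕ):ℤ) * (x::tl).getD i 0) tl.length]
    simp only [List.getD_cons_succ, List.getD_cons_zero, Nat.add_zero]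
    have hsum : ∑ i ∈ Finset.range tl.length, (((n-1).choose (j+(i+1)) : ℕ):ℤ) * tl.getD i 0
        = ∑ i ∈ Finset.range tl.length, (((n-1).choose (j+1+i) : ℕ):ℤ) * tl.getD i 0 := by
      apply Finset.sum_congr rfl
      intro i _
      rw [show j + (i+1) = j + 1 + i by omega]
    rw [hsum]
    ring

theorem addMyList_alt_eq_T (l : List Int) (h : l ≠ []) :
    addMyList_alt l = [pvT l] := by
  unfold addMyList_alt
  rw [if_neg h]
  have key := pvFold_inv l.length l 0 0 (by simp)
  simp only [Nat.choose_zero_right, Nat.cast_one, Nat.cast_zero, zero_add] at key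
  simp only [key]
  simp [pvT]

-- ===== VERDICT (by name: the statement is the Claim_ definition above) =====
theorem addMyList_spec : Claim_equal_addMyList := by
  intro l _
  unfold Spec_addMyList
  by_cases h : l = []
  · subst h
    rw [addMyList]
    decide
  · rw [addMyList_eq_T' l.length l rfl h, addMyList_alt_eq_T l h]
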